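-- pv_equiv track=rewrite | github.com/qholness/MiniMaps | MiniMaps/views.py | fix_input_string
-- ===== SOURCE A (Python) =====
-- def fix_input_string(string):
--     new_string = ""
--     invalid_chars = ""
--     for s in string:
--             if s not in invalid_chars:
--                 if s in "\'\"":
--                     new_string += "\\"
--                 new_string += s
--     return new_string
-- ===== SOURCE B (Python) =====
-- def fix_input_string(string):
--     return string.replace("'", "\\'").replace('"', '\\"')
-- ===== Notes on version B (the rewrite author's own statement) =====
-- stated objective: simpler
-- what changed: Replaces the per-character loop with quadratic string concatenation (and its vacuous invalid_chars check) by two whole-string str.replace passes, one per quote character.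
import Mathlib
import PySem

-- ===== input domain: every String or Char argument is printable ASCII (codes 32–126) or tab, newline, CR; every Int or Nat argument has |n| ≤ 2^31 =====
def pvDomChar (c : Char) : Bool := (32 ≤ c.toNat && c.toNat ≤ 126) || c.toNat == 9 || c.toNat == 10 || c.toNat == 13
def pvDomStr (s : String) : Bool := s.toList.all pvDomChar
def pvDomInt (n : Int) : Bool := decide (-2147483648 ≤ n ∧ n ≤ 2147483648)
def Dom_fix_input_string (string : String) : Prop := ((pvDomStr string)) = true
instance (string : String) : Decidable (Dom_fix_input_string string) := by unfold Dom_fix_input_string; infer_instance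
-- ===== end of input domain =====

-- B replaces A's per-character loop (with its vacuous invalid_chars check) by two whole-string replace passes, one per quote character; simpler.


-- ===== PORT A =====
-- for s in string: if s not in "": (if s in "'\"": new += "\\"); new += s
def fix_input_string (string : String) : String :=
  String.ofList (string.toList.foldl (fun new_string s =>
    if ¬ (PySem.Chars.isIn [s] "".toList = true) then
      (if PySem.Chars.isIn [s] "'\"".toList then new_string ++ ['\\'] else new_string) ++ [s]
    else new_string) [])

-- ===== PORT B =====
-- return string.replace("'", "\\'").replace('"', '\\"')
def fix_input_string_alt (string : String) : String :=
  PySem.Str.replace (PySem.Str.replace string "'" "\\'") "\"" "\\\""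

-- ===== PRECONDITION & SPEC =====
def Spec_fix_input_string (string : String) (out : String) : Prop := out = fix_input_string_alt string
instance (string : String) (out : String) : Decidable (Spec_fix_input_string string out) := by unfold Spec_fix_input_string; infer_instance

-- ===== CLAIM (what is proved, stated in full; the proofs are below) =====
def Claim_equal_fix_input_string : Prop := ∀ (string : String), Dom_fix_input_string string → Spec_fix_input_string string (fix_input_string string)

-- ===== LEMMAS AND PROOFS =====

-- membership of a single character in a character list
theorem isIn_singleton_go (c : Char) : ∀ (l : List Char) (k : Nat),
    (PySem.Chars.find.go [c] l k != -1) = l.contains c := by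
  intro l
  induction l with
  | nil => intro k; simp [PySem.Chars.find.go]
  | cons h t ih =>
    intro k
    simp only [PySem.Chars.find.go, List.isPrefixOf, List.contains_cons]
    by_cases hc : c == h
    · simp [hc]
    · simp [hc, ih]

theorem isIn_singleton (c : Char) (l : List Char) :
    PySem.Chars.isIn [c] l = l.contains c := by
  simp [PySem.Chars.isIn, PySem.Chars.find, isIn_singleton_go]

-- single-character replace is a flatMap
theorem replace_go_singleton (q : Char) (new : List Char) :
    ∀ (fuel : Nat) (l acc : List Char), l.length ≤ fuel →
      PySem.Chars.replace.go [q] new fuel l acc =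
        acc.reverse ++ l.flatMap (fun d => if d = q then new else [d]) := by
  intro fuel
  induction fuel with
  | zero =>
    intro l acc h
    have : l = [] := List.eq_nil_of_length_eq_zero (Nat.le_zero.mp h)
    subst this; simp [PySem.Chars.replace.go]
  | succ n ih =>
    intro l acc h
    cases l with
    | nil => simp [PySem.Chars.replace.go]
    | cons c t =>
      have hlen : t.length ≤ n := Nat.le_of_succ_le_succ (by simpa using h)
      simp only [PySem.Chars.replace.go, List.isPrefixOf]
      by_cases hc : q == c
      · have hq : c = q := ((beq_iff_eq).mp hc).symm
        simp only [hc, Bool.and_true, List.isPrefixOf_nil_left, if_true]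
        rw [ih _ _ (by simpa using hlen)]
        simp [hq, List.flatMap_cons]
      · simp only [hc, Bool.false_and, if_false]
        rw [ih t (c :: acc) hlen]
        have hq : ¬ c = q := fun e => hc (beq_iff_eq.mpr e.symm)
        simp [hq, List.flatMap_cons]

theorem replace_singleton (q : Char) (new : List Char) (s : List Char) :
    PySem.Chars.replace s [q] new = s.flatMap (fun d => if d = q then new else [d]) := by
  simp [PySem.Chars.replace, replace_go_singleton q new s.length s [] (Nat.le_refl _)]

-- A's loop as a flatMap
theorem foldA (l : List Char) : ∀ (acc : List Char),
    (l.foldl (fun new_string s =>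
      if ¬ (PySem.Chars.isIn [s] "".toList = true) then
        (if PySem.Chars.isIn [s] "'\"".toList then new_string ++ ['\\'] else new_string) ++ [s]
      else new_string) acc) =
    acc ++ l.flatMap (fun c => if c = '\'' ∨ c = '"' then ['\\', c] else [c]) := by
  induction l with
  | nil => intro acc; simp
  | cons c t ih =>
    intro acc
    rw [List.foldl_cons, ih]
    have e : "'\"".toList = ['\'', '"'] := rfl
    by_cases h : c = '\'' ∨ c = '"'
    · have hm : (['\'', '"'].contains c) = true := by rcases h with h | h <;> simp [h]
      simp [isIn_singleton, e, hm, h, List.flatMap_cons, List.append_assoc]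
    · have hm : (['\'', '"'].contains c) = false := by
        simp only [List.contains_cons, List.contains_nil, Bool.or_false]
        push_neg at h
        simp [h.1, h.2]
      simp [isIn_singleton, e, hm, h, List.flatMap_cons, List.append_assoc]

theorem composeB (l : List Char) :
    (l.flatMap (fun d => if d = '\'' then ['\\', '\''] else [d])).flatMap
      (fun d => if d = '"' then ['\\', '"'] else [d]) =
    l.flatMap (fun c => if c = '\'' ∨ c = '"' then ['\\', c] else [c]) := by
  induction l with
  | nil => rfl
  | cons c t ih =>
    simp only [List.flatMap_cons, List.flatMap_append, ih]
    congr 1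
    by_cases h1 : c = '\''
    · simp [h1]
    · by_cases h2 : c = '"'
      · simp [h2]
      · simp [h1, h2, List.flatMap_cons]

-- ===== VERDICT (by name: the statement is the Claim_ definition above) =====
theorem fix_input_string_spec : Claim_equal_fix_input_string := by
  intro string _
  show fix_input_string string = fix_input_string_alt string
  have hB : (fix_input_string_alt string).toList =
      string.toList.flatMap (fun c => if c = '\'' ∨ c = '"' then ['\\', c] else [c]) := by
    have e1 : "'".toList = ['\''] := rfl
    have e2 : "\\'".toList = ['\\', '\''] := rfl
    have e3 : "\"".toList = ['"'] := rfl
    have e4 : "\\\"".toList = ['\\', '"'] := rfl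
    simp only [fix_input_string_alt, PySem.Str.toList_replace, e1, e2, e3, e4]
    rw [replace_singleton, replace_singleton]
    exact composeB string.toList
  have hA : fix_input_string string =
      String.ofList (string.toList.flatMap (fun c => if c = '\'' ∨ c = '"' then ['\\', c] else [c])) := by
    simp only [fix_input_string, foldA, List.nil_append]
  rw [hA, ← hB]; exact String.ofList_toList
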